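-- pv_equiv track=rewrite | github.com/platipenguin/metaproteomics-database-optimization | jupyter_notebooks/elliot_utils.py | getTrypticPeptides
-- ===== SOURCE A (Python) =====
-- def getTrypticPeptides(aaString):
--     aaString = aaString.replace('\n', '')
--     aaString = aaString.replace(' ', '')
--     tryptics = []
--     lastCleavage = 0
--     for i in range(len(aaString)):
--         if i == len(aaString) - 1:
--             tryptics.append(aaString[lastCleavage:i + 1])
--         elif aaString[i] == 'R' or aaString[i] == 'K':
--             if aaString[i + 1] == 'P':
--                 continue
--             tryptics.append(aaString[lastCleavage:i + 1])
--             lastCleavage = i + 1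
--     return tryptics
-- ===== SOURCE B (Python) =====
-- def getTrypticPeptides(aaString):
--     chars = list(aaString.replace('\n', '').replace(' ', ''))
--     peptides = []
--     current = []
--     for c, nxt in zip(chars, chars[1:] + [None]):
--         current.append(c)
--         if (c == 'K' or c == 'R') and nxt is not None and nxt != 'P':
--             peptides.append(''.join(current))
--             current = []
--     if current:
--         peptides.append(''.join(current))
--     return peptides
-- ===== Notes on version B (the rewrite author's own statement) =====
-- stated objective: idiomatic
-- what changed: Replaced A's index-tracking loop with slicing (lastCleavage bookkeeping, aaString[lastCleavage:i+1]) by a single streaming pass that zips each character with its successor and accumulates the current peptide directly, flushing it at each cleavage point and once at the end; no indices or slices remain.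
import Mathlib
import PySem

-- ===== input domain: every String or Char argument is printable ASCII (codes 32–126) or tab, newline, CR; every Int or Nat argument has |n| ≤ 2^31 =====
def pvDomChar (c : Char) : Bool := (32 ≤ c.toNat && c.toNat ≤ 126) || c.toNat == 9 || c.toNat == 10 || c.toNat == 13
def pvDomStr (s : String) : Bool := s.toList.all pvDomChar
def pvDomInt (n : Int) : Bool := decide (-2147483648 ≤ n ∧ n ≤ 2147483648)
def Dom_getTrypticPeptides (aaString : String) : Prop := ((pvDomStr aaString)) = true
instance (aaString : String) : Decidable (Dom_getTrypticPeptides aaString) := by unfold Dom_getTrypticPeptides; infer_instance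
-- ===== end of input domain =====

-- B replaces A's index/slice bookkeeping with one streaming pass (character zipped with its
-- successor, current peptide accumulated and flushed at cleavage points): idiomatic, same cost.

-- ===== PORT A =====
def getTrypticPeptides (aaString : String) : List String :=
  let s := PySem.Str.replace (PySem.Str.replace aaString "\n" "") " " ""
  let n : Int := PySem.Str.len s
  ((PySem.List.pyRange 0 n 1).foldl
    (fun (st : List String × Int) i =>
      if i == n - 1 then
        (st.1 ++ [PySem.Str.slice s (some st.2) (some (i + 1))], st.2)
      else if PySem.Str.pyGet? s i == some 'R' || PySem.Str.pyGet? s i == some 'K' then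
        if PySem.Str.pyGet? s (i + 1) == some 'P' then st
        else (st.1 ++ [PySem.Str.slice s (some st.2) (some (i + 1))], i + 1)
      else st)
    ([], 0)).1

-- ===== PORT B =====
-- port of Source B; `.map some` only injects Char into Option Char so the Lean zip with
-- `chars[1:] + [None]` typechecks (Python mixes the types freely in one list)
def getTrypticPeptides_alt (aaString : String) : List String :=
  let chars := (PySem.Str.replace (PySem.Str.replace aaString "\n" "") " " "").toList
  let st := (chars.zip ((PySem.List.slice chars (some 1) none).map some ++ [none])).foldl
    (fun (st : List String × List Char) cn =>
      let current := st.2 ++ [cn.1]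
      if (cn.1 == 'K' || cn.1 == 'R') && cn.2 != none && cn.2 != some 'P' then
        (st.1 ++ [String.ofList current], [])
      else (st.1, current))
    ([], [])
  if st.2 ≠ [] then st.1 ++ [String.ofList st.2] else st.1

-- ===== PRECONDITION & SPEC =====
def Spec_getTrypticPeptides (aaString : String) (out : List String) : Prop := out = getTrypticPeptides_alt aaString
instance (aaString : String) (out : List String) : Decidable (Spec_getTrypticPeptides aaString out) := by unfold Spec_getTrypticPeptides; infer_instance

-- ===== CLAIM (what is proved, stated in full; the proofs are below) =====
def Claim_equal_getTrypticPeptides : Prop := ∀ (aaString : String), Dom_getTrypticPeptides aaString → Spec_getTrypticPeptides aaString (getTrypticPeptides aaString)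

-- ===== LEMMAS AND PROOFS =====

-- reference splitter on the cleaned character list: `pvChop cur l` = peptides of `cur ++ l`
-- with `cur` the pending (already scanned) prefix of the current peptide
def pvChop : List Char → List Char → List (List Char)
  | cur, [] => [cur]
  | cur, c :: rest =>
    if (c = 'K' ∨ c = 'R') ∧ rest.head? ≠ some 'P' ∧ rest ≠ [] then
      (cur ++ [c]) :: pvChop [] rest
    else pvChop (cur ++ [c]) rest

lemma pvChop_B (cs : List Char) : ∀ (cur : List Char) (acc : List String),
    (fun st : List String × List Char =>
        if st.2 ≠ [] then st.1 ++ [String.ofList st.2] else st.1)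
      ((cs.zip ((cs.drop 1).map some ++ [none])).foldl
        (fun (st : List String × List Char) cn =>
          let current := st.2 ++ [cn.1]
          if (cn.1 == 'K' || cn.1 == 'R') && cn.2 != none && cn.2 != some 'P' then
            (st.1 ++ [String.ofList current], [])
          else (st.1, current))
        (acc, cur))
    = acc ++ (if cs = [] then (if cur = [] then [] else [String.ofList cur])
              else (pvChop cur cs).map String.ofList) := by
  induction cs with
  | nil => intro cur acc; by_cases h : cur = [] <;> simp [h]
  | cons c rest ih =>
    intro cur acc
    cases rest with
    | nil =>
      simp [pvChop]
    | cons r rs =>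
      by_cases hcl : (c = 'K' ∨ c = 'R') ∧ ¬r = 'P'
      · simpa [pvChop, hcl, List.append_assoc] using
          ih [] (acc ++ [String.ofList (cur ++ [c])])
      · simpa [pvChop, hcl, List.append_assoc] using ih (cur ++ [c]) acc

lemma pvSlice_ofList (s : String) (lc k : Nat) :
    PySem.Str.slice s (some (lc : Int)) (some ((k : Int) + 1))
      = String.ofList ((s.toList.drop lc).take (k + 1 - lc)) := by
  have h1 : ((k : Int) + 1) = ((k + 1 : Nat) : Int) := by push_cast; ring
  calc PySem.Str.slice s (some (lc : Int)) (some ((k : Int) + 1))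
      = String.ofList (PySem.Str.slice s (some (lc : Int)) (some ((k : Int) + 1))).toList :=
        String.ofList_toList.symm
    _ = _ := by
        rw [PySem.Str.toList_slice, h1]
        show String.ofList (PySem.List.slice s.toList (some ((lc : Nat) : Int)) (some ((k + 1 : Nat) : Int))) = _
        rw [PySem.List.slice_natCast]

lemma pvTake_ext (cs : List Char) (lc k : Nat) (hlc : lc ≤ k) (hk : k < cs.length) :
    (cs.drop lc).take (k - lc) ++ [cs[k]] = (cs.drop lc).take (k + 1 - lc) := by
  have h1 : k + 1 - lc = (k - lc) + 1 := by omega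
  rw [h1, List.take_succ, List.getElem?_drop]
  have h2 : lc + (k - lc) = k := by omega
  rw [h2, List.getElem?_eq_getElem hk]
  rfl

lemma pvChop_A (s : String) : ∀ (d k lc : Nat) (acc : List String),
    s.toList.length - k = d → lc ≤ k → k < s.toList.length →
    ((PySem.List.pyRange (k : Int) (PySem.Str.len s) 1).foldl
      (fun (st : List String × Int) i =>
        if i == PySem.Str.len s - 1 then
          (st.1 ++ [PySem.Str.slice s (some st.2) (some (i + 1))], st.2)
        else if PySem.Str.pyGet? s i == some 'R' || PySem.Str.pyGet? s i == some 'K' then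
          if PySem.Str.pyGet? s (i + 1) == some 'P' then st
          else (st.1 ++ [PySem.Str.slice s (some st.2) (some (i + 1))], i + 1)
        else st)
      (acc, (lc : Int))).1
    = acc ++ (pvChop ((s.toList.drop lc).take (k - lc)) (s.toList.drop k)).map String.ofList := by
  intro d
  induction d with
  | zero => intro k lc acc hd hlc hk; omega
  | succ d ih =>
    intro k lc acc hd hlc hk
    have hlen : PySem.Str.len s = (s.toList.length : Int) := PySem.Str.len_eq s
    rw [PySem.List.pyRange_one_cons (by rw [hlen]; exact_mod_cast hk), List.foldl_cons]
    by_cases hlast : k + 1 = s.toList.length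
    · have hc1 : ((k : Int) == PySem.Str.len s - 1) = true := by
        rw [hlen]; simp only [beq_iff_eq]; omega
      simp only [hc1, eq_self_iff_true, if_true]
      rw [PySem.List.pyRange_one_eq_nil (by rw [hlen]; push_cast; omega), List.foldl_nil]
      rw [pvSlice_ofList s lc k]
      rw [List.drop_eq_getElem_cons hk, List.drop_eq_nil_of_le (le_of_eq hlast.symm)]
      simp only [pvChop]
      simp [← pvTake_ext s.toList lc k hlc hk]
    · have hklt : k + 1 < s.toList.length := by omega
      have hc1 : ((k : Int) == PySem.Str.len s - 1) = false := by
        rw [hlen]; simp only [beq_eq_false_iff_ne, ne_eq]; omega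
      have hget : PySem.Str.pyGet? s (k : Int) = some s.toList[k] := by
        rw [PySem.Str.pyGet?_natCast, List.getElem?_eq_getElem hk]
      have hget1 : PySem.Str.pyGet? s ((k : Int) + 1) = some s.toList[k + 1] := by
        have : ((k : Int) + 1) = ((k + 1 : Nat) : Int) := by push_cast; ring
        rw [this, PySem.Str.pyGet?_natCast, List.getElem?_eq_getElem hklt]
      have hd' : s.toList.length - (k + 1) = d := by omega
      have hdropk : s.toList.drop k = s.toList[k] :: s.toList.drop (k + 1) :=
        List.drop_eq_getElem_cons hk
      have hhead : (s.toList.drop (k + 1)).head? = some s.toList[k + 1] := by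
        rw [List.drop_eq_getElem_cons hklt]; rfl
      have hne : s.toList.drop (k + 1) ≠ [] := by
        rw [ne_eq, List.drop_eq_nil_iff]; omega
      simp only [hc1, Bool.false_eq_true, if_false]
      by_cases hKR : s.toList[k] = 'R' ∨ s.toList[k] = 'K'
      · have hb : (PySem.Str.pyGet? s (k : Int) == some 'R' || PySem.Str.pyGet? s (k : Int) == some 'K') = true := by
          rw [hget]; rcases hKR with h | h <;> simp [h]
        simp only [hb, if_true]
        by_cases hP : s.toList[k + 1] = 'P'
        · have hbp : (PySem.Str.pyGet? s ((k : Int) + 1) == some 'P') = true := by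
            rw [hget1]; simp [hP]
          simp only [hbp, if_true]
          have hcast : ((k : Int) + 1) = ((k + 1 : Nat) : Int) := by push_cast; ring
          rw [hcast, ih (k + 1) lc acc hd' (by omega) hklt]
          rw [hdropk]
          have hcond : ¬ ((s.toList[k] = 'K' ∨ s.toList[k] = 'R') ∧
              (s.toList.drop (k + 1)).head? ≠ some 'P' ∧ s.toList.drop (k + 1) ≠ []) := by
            rw [hhead]; simp [hP]
          simp only [pvChop, if_neg hcond]
          rw [pvTake_ext s.toList lc k hlc hk]
        · have hbp : (PySem.Str.pyGet? s ((k : Int) + 1) == some 'P') = false := by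
            rw [hget1]; simp [hP]
          simp only [hbp, Bool.false_eq_true, if_false]
          have hcast : ((k : Int) + 1) = ((k + 1 : Nat) : Int) := by push_cast; ring
          rw [hcast, ih (k + 1) (k + 1) (acc ++ [PySem.Str.slice s (some (lc : Int)) (some ((k + 1 : Nat) : Int))]) hd' (le_refl _) hklt]
          have : ((k + 1 : Nat) : Int) = (k : Int) + 1 := by push_cast; ring
          rw [this, pvSlice_ofList s lc k]
          rw [hdropk]
          have hcond : (s.toList[k] = 'K' ∨ s.toList[k] = 'R') ∧
              (s.toList.drop (k + 1)).head? ≠ some 'P' ∧ s.toList.drop (k + 1) ≠ [] := by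
            refine ⟨hKR.symm, ?_, hne⟩
            rw [hhead]; simp [hP]
          simp only [pvChop, if_pos hcond]
          simp [← pvTake_ext s.toList lc k hlc hk]
      · have hb : (PySem.Str.pyGet? s (k : Int) == some 'R' || PySem.Str.pyGet? s (k : Int) == some 'K') = false := by
          rw [hget]
          rcases Decidable.em (s.toList[k] = 'R') with h1 | h1
          · exact absurd (Or.inl h1) hKR
          · rcases Decidable.em (s.toList[k] = 'K') with h2 | h2
            · exact absurd (Or.inr h2) hKR
            · simp [h1, h2]
        simp only [hb, Bool.false_eq_true, if_false]
        have hcast : ((k : Int) + 1) = ((k + 1 : Nat) : Int) := by push_cast; ring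
        rw [hcast, ih (k + 1) lc acc hd' (by omega) hklt]
        rw [hdropk]
        have hcond : ¬ ((s.toList[k] = 'K' ∨ s.toList[k] = 'R') ∧
            (s.toList.drop (k + 1)).head? ≠ some 'P' ∧ s.toList.drop (k + 1) ≠ []) := by
          push_neg at hKR
          simp [hKR.1, hKR.2]
        simp only [pvChop, if_neg hcond]
        rw [pvTake_ext s.toList lc k hlc hk]

-- ===== VERDICT (by name: the statement is the Claim_ definition above) =====
theorem getTrypticPeptides_spec : Claim_equal_getTrypticPeptides := by
  intro aaString _
  show getTrypticPeptides aaString = getTrypticPeptides_alt aaString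
  simp only [getTrypticPeptides, getTrypticPeptides_alt, PySem.List.slice_from_one,
    ← List.drop_one]
  set s := PySem.Str.replace (PySem.Str.replace aaString "\n" "") " " "" with hs
  by_cases h0 : s.toList = []
  · have hlen0 : PySem.Str.len s = 0 := by rw [PySem.Str.len_eq, h0]; rfl
    rw [hlen0, PySem.List.pyRange_one_eq_nil (le_refl 0), List.foldl_nil, h0]
    simp
  · have hpos : 0 < s.toList.length := List.length_pos_of_ne_nil h0
    have hA := pvChop_A s s.toList.length 0 0 [] (by omega) (by omega) hpos
    have hB := pvChop_B s.toList [] []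
    simp only [Nat.cast_zero, List.drop_zero, List.take_zero, List.nil_append,
      Nat.sub_zero, if_neg h0] at hA hB
    rw [hA, ← hB]
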